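-- pv_equiv track=rewrite | github.com/AdamZhouSE/pythonHomework | Code/CodeRecords/2209/60698/289160.py | knock
-- ===== SOURCE A (Python) =====
-- def knock(sorted_seg, string):
--     count = [0] * len(string)
--     for seg in sorted_seg:
--         if seg in string:
--             dei=False
--             same=0
--             while not dei:
--                 for i in range(0, len(string)):
--                     if string[i] == seg[0]:
--                         try:
--                             if string[i:i + len(seg)] == seg:
--                                 ok=True
--                                 sum=0
--                                 for j in range(i, i + len(seg)):
--                                     if count[j]==1:
--                                         sum=sum+1
--                                         if sum>same:
--                                             ok=False
--                                             break
--                                 if ok: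
--                                     for j in range(i, i + len(seg)):
--                                         count[j]=1
--                                         dei=True
--                                     break
--                         except:
--                             continue
--                 same=same+1
--     if min(count) == 1:
--         return True
--     else:
--         return False
-- ===== SOURCE B (Python) =====
-- def knock(sorted_seg, string):
--     n = len(string)
--     count = [0] * n
--     for seg in sorted_seg:
--         m = len(seg)
--         starts = [i for i in range(n - m + 1) if string[i:i + m] == seg]
--         if starts:
--             best = min(starts, key=lambda i: sum(count[i:i + m]))
--             count[best:best + m] = [1] * m
--     return 0 not in count
-- ===== Notes on version B (the rewrite author's own statement) =====
-- stated objective: simpler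
-- what changed: B replaces A's tolerance-escalating rescan loop (retry the whole string with an ever-larger allowed overlap until a placement fits) by one pass that collects all match positions and places the segment at the leftmost position of minimal overlap via min(key=...).
import Mathlib
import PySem

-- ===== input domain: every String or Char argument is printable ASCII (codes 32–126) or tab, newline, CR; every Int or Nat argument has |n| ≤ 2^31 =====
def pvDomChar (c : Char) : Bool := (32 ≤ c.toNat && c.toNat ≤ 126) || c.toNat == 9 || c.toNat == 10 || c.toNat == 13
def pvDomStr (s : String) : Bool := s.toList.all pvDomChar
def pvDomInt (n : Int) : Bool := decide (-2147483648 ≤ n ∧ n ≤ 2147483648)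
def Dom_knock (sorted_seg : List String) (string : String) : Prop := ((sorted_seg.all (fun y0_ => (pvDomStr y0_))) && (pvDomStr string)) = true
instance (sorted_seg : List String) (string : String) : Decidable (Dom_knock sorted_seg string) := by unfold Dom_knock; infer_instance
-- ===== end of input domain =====

-- B replaces A's tolerance-escalating rescan loop by one pass computing the leftmost minimal-overlap placement.

-- ===== PORT A =====
-- inner 'for j' loop: count the 1-entries of count[j:stop], break with ok=False as soon as sum > same
def knockOk (count : List Int) (same stop j sum : Nat) : Bool :=
  if h : j < stop then
    if count.getD j 0 = 1 then
      if sum + 1 > same then false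
      else knockOk count same stop (j+1) (sum+1)
    else knockOk count same stop (j+1) sum
  else true
termination_by stop - j
decreasing_by all_goals omega

-- the 'for i in range(0, len(string))' scan: first i whose window matches sg with overlap ≤ same
def knockFind (s sg : List Char) (count : List Int) (same i : Nat) : Option Nat :=
  if h : i < s.length then
    if s.getD i ' ' = sg.getD 0 ' ' then
      if (s.drop i).take sg.length = sg ∧ knockOk count same (i + sg.length) i 0 = true then some i
      else knockFind s sg count same (i+1)
    else knockFind s sg count same (i+1)
  else none
termination_by s.length - i
decreasing_by all_goals omega

-- 'for j in range(i, i+len(seg)): count[j] = 1'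
def knockSet (count : List Int) (i m : Nat) : List Int :=
  match m with
  | 0 => count
  | m'+1 => knockSet (count.set i 1) (i+1) m'

-- the 'while not dei' tolerance loop; on Pre_ inputs it ends within len(seg)+1 rounds (the fuel),
-- since the overlap of any matching window is at most len(seg)
def knockWhile (s sg : List Char) (count : List Int) (same fuel : Nat) : List Int :=
  match fuel with
  | 0 => count
  | fuel'+1 =>
    match knockFind s sg count same 0 with
    | some i => knockSet count i sg.length
    | none => knockWhile s sg count (same+1) fuel'

def knock (sorted_seg : List String) (string : String) : Bool :=
  let s := string.toList
  let final := sorted_seg.foldl (fun count seg =>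
    if PySem.Chars.isIn seg.toList s then
      knockWhile s seg.toList count 0 (seg.toList.length + 1)
    else count) (List.replicate s.length 0)
  decide (PySem.List.min? final (fun x => x) = some 1)

-- ===== PORT B =====
-- the key 'lambda i: sum(count[i:i+m])'
def knockOverlap (count : List Int) (i m : Nat) : Int := ((count.drop i).take m).sum

-- builtin min(starts, key=...) hand-ported exactly: running first-strict-minimum over the list
def knockBest (count : List Int) (m : Nat) : List Nat → Nat → Nat
  | [], b => b
  | i :: t, b => knockBest count m t (if knockOverlap count i m < knockOverlap count b m then i else b)

-- slice assignment count[best:best+m] = [1]*m (best+m ≤ len(count) for every match position)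
def knockPlace (count : List Int) (i m : Nat) : List Int :=
  count.take i ++ List.replicate m 1 ++ count.drop (i + m)

def knock_alt (sorted_seg : List String) (string : String) : Bool :=
  let s := string.toList
  let n := s.length
  let final := sorted_seg.foldl (fun count seg =>
    let sg := seg.toList
    let m := sg.length
    -- Python range(n-m+1): empty when m > n; Nat gives range 1 = [0] there, but the filter
    -- rejects 0 (the window is shorter than sg), so 'starts' is the same list
    let starts := (List.range (n - m + 1)).filter (fun i => (s.drop i).take m = sg)
    match starts with
    | [] => count
    | i0 :: rest => knockPlace count (knockBest count m rest i0) m) (List.replicate n 0)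
  !(final.contains 0)

-- ===== PRECONDITION & SPEC =====
-- Pre_ excludes exactly the inputs on which A never returns: an empty string (min([]) raises ValueError,
-- or an infinite while loop if some segment is empty too) and empty segments (seg[0] raises IndexError).
def Pre_knock (sorted_seg : List String) (string : String) : Prop :=
  "" ∉ sorted_seg ∧ string ≠ ""
instance (sorted_seg : List String) (string : String) : Decidable (Pre_knock sorted_seg string) := by unfold Pre_knock; infer_instance

def pvWitness_knock : List String × String := (["ab", "ba"], "aba")

def Spec_knock (sorted_seg : List String) (string : String) (out : Bool) : Prop := out = knock_alt sorted_seg string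
instance (sorted_seg : List String) (string : String) (out : Bool) : Decidable (Spec_knock sorted_seg string out) := by unfold Spec_knock; infer_instance

-- ===== CLAIM (what is proved, stated in full; the proofs are below) =====
def Claim_equal_knock : Prop := ∀ (sorted_seg : List String) (string : String), Dom_knock sorted_seg string → Pre_knock sorted_seg string → Spec_knock sorted_seg string (knock sorted_seg string)

-- ===== LEMMAS AND PROOFS =====

-- number of 1-entries in the window count[i:i+m]
def ones (count : List Int) (i m : Nat) : Nat := ((count.drop i).take m).count 1
def inv01 (count : List Int) : Prop := ∀ x ∈ count, x = 0 ∨ x = 1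

theorem ones_succ (count : List Int) (j k : Nat) (hj : j < count.length) :
    ones count j (k+1) = (if count[j] = 1 then 1 else 0) + ones count (j+1) k := by
  have hdrop : count.drop j = count[j] :: count.drop (j+1) := List.drop_eq_getElem_cons hj
  simp only [ones, hdrop, List.take_succ_cons, List.count_cons]
  by_cases h1 : count[j] = 1 <;> simp [h1] <;> omega

theorem ones_oob (count : List Int) (j k : Nat) (hj : ¬ j < count.length) :
    ones count j k = 0 := by
  simp only [ones, List.drop_eq_nil_of_le (by omega : count.length ≤ j)]
  simp

theorem knockOk_eq (count : List Int) (same : Nat) :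
    ∀ k j sum, sum ≤ same →
      knockOk count same (j + k) j sum = decide (sum + ones count j k ≤ same) := by
  intro k
  induction k with
  | zero =>
    intro j sum h
    rw [knockOk]
    simp [ones, h]
  | succ k ih =>
    intro j sum h
    rw [knockOk]
    have hlt : j < j + (k+1) := by omega
    by_cases hj : j < count.length
    · have hgd : count.getD j 0 = count[j] := List.getD_eq_getElem count 0 hj
      rw [ones_succ count j k hj]
      by_cases h1 : count[j] = 1
      · by_cases hb : sum + 1 > same
        · simp only [hlt, hgd, h1, hb, if_true, dif_pos]
          have : ¬ (sum + ((if count[j] = 1 then 1 else 0) + ones count (j+1) k) ≤ same) := by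
            simp [h1]; omega
          simp [h1, this]
          omega
        · have h' : sum + 1 ≤ same := by omega
          have := ih (j+1) (sum+1) h'
          simp only [hlt, hgd, h1, hb, if_true, if_false, dif_pos]
          rw [show j + (k+1) = (j+1) + k by omega, this]
          simp [h1]
          constructor <;> intro <;> omega
      · have := ih (j+1) sum h
        simp only [hlt, hgd, h1, if_false, dif_pos]
        rw [show j + (k+1) = (j+1) + k by omega, this]
        simp [h1]
    · have hgd : count.getD j 0 = 0 := by
        rw [List.getD_eq_getElem?_getD]
        simp [List.getElem?_eq_none (by omega : count.length ≤ j)]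
      have := ih (j+1) sum h
      rw [ones_oob count j (k+1) hj]
      simp only [hlt, hgd, dif_pos]
      rw [show j + (k+1) = (j+1) + k by omega, this, ones_oob count (j+1) k (by omega)]
      simp

theorem knockFind_eq (s sg : List Char) (hsg : sg ≠ []) (count : List Int) (same i : Nat) :
    knockFind s sg count same i =
      ((List.range' i (s.length - i)).filter (fun x => decide ((s.drop x).take sg.length = sg))).find?
        (fun x => decide (ones count x sg.length ≤ same)) := by
  fun_induction knockFind s sg count same i
  case case1 i h hch hcond =>
    obtain ⟨hp, hok⟩ := hcond
    rw [knockOk_eq count same sg.length i 0 (by omega)] at hok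
    rw [show s.length - i = (s.length - (i+1)) + 1 by omega, List.range'_succ]
    simp only [List.filter_cons, hp, decide_eq_true_eq, decide_true, if_true]
    rw [List.find?_cons_of_pos]
    simpa using hok
  case case2 i h hch hcond ih =>
    rw [ih, show s.length - i = (s.length - (i+1)) + 1 by omega, List.range'_succ]
    by_cases hp : List.take sg.length (List.drop i s) = sg
    · have hok : ¬ knockOk count same (i + sg.length) i 0 = true := fun hk => hcond ⟨hp, hk⟩
      rw [knockOk_eq count same sg.length i 0 (by omega)] at hok
      simp only [List.filter_cons, hp, decide_true, if_true]
      rw [List.find?_cons_of_neg]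
      simpa using hok
    · simp [List.filter_cons, hp]
  case case3 i h hch ih =>
    have hp : ¬ List.take sg.length (List.drop i s) = sg := by
      intro hsl
      apply hch
      obtain ⟨c, t, rfl⟩ := List.exists_cons_of_ne_nil hsg
      have hdrop : s.drop i = s[i] :: s.drop (i+1) := List.drop_eq_getElem_cons h
      rw [hdrop, List.length_cons, List.take_succ_cons, List.cons.injEq] at hsl
      rw [List.getD_eq_getElem s ' ' h, hsl.1]
      rfl
    rw [ih, show s.length - i = (s.length - (i+1)) + 1 by omega, List.range'_succ]
    simp [List.filter_cons, hp]
  case case4 i h =>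
    rw [show s.length - i = 0 by omega]
    rfl

theorem knockSet_eq (m : Nat) : ∀ (count : List Int) (i : Nat), i + m ≤ count.length →
    knockSet count i m = count.take i ++ List.replicate m 1 ++ count.drop (i + m) := by
  induction m with
  | zero => intro c i h; simp [knockSet]
  | succ m ih =>
    intro c i h
    show knockSet (c.set i 1) (i+1) m = _
    rw [ih (c.set i 1) (i+1) (by simp; omega)]
    have hi : i < c.length := by omega
    have h1 : (c.set i 1).take (i+1) = c.take i ++ [1] := by
      apply List.ext_getElem
      · simp; omega
      · intro j hj hj'
        simp only [List.getElem_take, List.getElem_set]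
        by_cases hji : j = i
        · subst hji; simp
        · have hjlt : j < i := by simp at hj; omega
          simp [List.getElem_append, List.getElem_take, hjlt]
          rw [if_neg (by omega), dif_pos (by omega)]
    have h2 : (c.set i 1).drop (i+1+m) = c.drop (i+1+m) := by
      rw [List.drop_set]
      simp [show i < i+1+m by omega]
    rw [h1, h2, show i+1+m = i+(m+1) by omega]
    simp [List.replicate_succ]

theorem sum_eq_count (l : List Int) (h : ∀ x ∈ l, x = 0 ∨ x = 1) : l.sum = (l.count 1 : Int) := by
  induction l with
  | nil => simp
  | cons a t ih =>
    have ha := h a (by simp)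
    have ht := ih (fun x hx => h x (by simp [hx]))
    rcases ha with h0 | h1
    · subst h0; simp [List.count_cons, ht]
    · subst h1; simp [List.count_cons, ht]; omega

theorem overlap_eq_ones (count : List Int) (hinv : inv01 count) (i m : Nat) :
    knockOverlap count i m = (((count.drop i).take m).count 1 : Int) := by
  apply sum_eq_count
  intro x hx
  exact hinv x (List.mem_of_mem_drop (List.mem_of_mem_take hx))

theorem exists_minKey (f : Nat → Nat) : ∀ (l : List Nat), l ≠ [] →
    ∃ K, (∀ x ∈ l, K ≤ f x) ∧ ∃ x ∈ l, f x = K := by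
  intro l
  induction l with
  | nil => intro h; exact absurd rfl h
  | cons a t ih =>
    intro _
    rcases t with _ | ⟨b, t'⟩
    · exact ⟨f a, by simp, a, by simp⟩
    · obtain ⟨K', hlb, x, hx, hfx⟩ := ih (by simp)
      by_cases hK : f a ≤ K'
      · refine ⟨f a, ?_, a, by simp, rfl⟩
        intro y hy
        rcases List.mem_cons.mp hy with rfl | hy
        · exact le_refl _
        · exact le_trans hK (hlb y hy)
      · refine ⟨K', ?_, x, by simp [hx], hfx⟩
        intro y hy
        rcases List.mem_cons.mp hy with rfl | hy
        · omega
        · exact hlb y hy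

theorem knockBest_stays (count : List Int) (m : Nat) :
    ∀ (t : List Nat) (b : Nat), (∀ x ∈ t, ¬ knockOverlap count x m < knockOverlap count b m) →
      knockBest count m t b = b := by
  intro t
  induction t with
  | nil => intro b _; rfl
  | cons i t' ih =>
    intro b h
    show knockBest count m t' (if _ then i else b) = b
    rw [if_neg (h i (by simp))]
    exact ih b (fun x hx => h x (by simp [hx]))

theorem knockBest_eq (count : List Int) (m : Nat) (hinv : inv01 count) (K : Nat) :
    ∀ (l : List Nat) (b : Nat), (∀ x ∈ b :: l, K ≤ ones count x m) → (∃ x ∈ b :: l, ones count x m = K) →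
      (b :: l).find? (fun x => decide (ones count x m ≤ K)) = some (knockBest count m l b) := by
  have hov : ∀ x y, (knockOverlap count x m < knockOverlap count y m) ↔ ones count x m < ones count y m := by
    intro x y
    rw [overlap_eq_ones count hinv, overlap_eq_ones count hinv]
    exact_mod_cast Iff.rfl
  intro l
  induction l with
  | nil =>
    intro b hlb hex
    obtain ⟨x, hx, hfx⟩ := hex
    simp at hx
    subst hx
    simp [knockBest, List.find?_cons, hfx]
  | cons i t ih =>
    intro b hlb hex
    by_cases hqb : ones count b m ≤ K
    · rw [List.find?_cons_of_pos (by simpa using hqb)]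
      rw [knockBest_stays count m (i :: t) b]
      intro x hx
      rw [hov]
      have := hlb b (by simp)
      have := hlb x (List.mem_cons_of_mem b hx)
      omega
    · rw [List.find?_cons_of_neg (by simpa using hqb)]
      show _ = some (knockBest count m t (if _ then i else b))
      by_cases hlt : knockOverlap count i m < knockOverlap count b m
      · rw [if_pos hlt]
        apply ih
        · intro x hx; exact hlb x (by simp at hx ⊢; tauto)
        · obtain ⟨x, hx, hfx⟩ := hex
          rcases (by simpa using hx : x = b ∨ x = i ∨ x ∈ t) with rfl | hx'
          · omega
          · exact ⟨x, by simpa using hx', hfx⟩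
      · rw [if_neg hlt]
        rw [hov] at hlt
        have hqi : ¬ ones count i m ≤ K := by
          have := hlb b (by simp); have := hlb i (by simp); omega
        rw [List.find?_cons_of_neg (by simpa using hqi)]
        have := ih b (by intro x hx; exact hlb x (by simp at hx ⊢; tauto))
          (by obtain ⟨x, hx, hfx⟩ := hex
              rcases (by simpa using hx : x = b ∨ x = i ∨ x ∈ t) with rfl | rfl | hx'
              · omega
              · omega
              · exact ⟨x, by simp [hx'], hfx⟩)
        rw [List.find?_cons_of_neg (by simpa using hqb)] at this
        exact this

theorem knockWhile_eq (s sg : List Char) (hsg : sg ≠ []) (count : List Int) (K : Nat)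
    (S : List Nat) (hS : S = (List.range s.length).filter (fun x => decide ((s.drop x).take sg.length = sg)))
    (hlb : ∀ x ∈ S, K ≤ ones count x sg.length) (hex : ∃ x ∈ S, ones count x sg.length = K) :
    ∀ fuel same, same ≤ K → K < same + fuel →
      ∃ b, S.find? (fun x => decide (ones count x sg.length ≤ K)) = some b ∧
        knockWhile s sg count same fuel = knockSet count b sg.length := by
  intro fuel
  induction fuel with
  | zero => intro same h1 h2; omega
  | succ fuel ih =>
    intro same h1 h2
    have hfind : knockFind s sg count same 0 =
        S.find? (fun x => decide (ones count x sg.length ≤ same)) := by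
      rw [knockFind_eq s sg hsg count same 0, hS, List.range_eq_range', Nat.sub_zero]
    by_cases hsame : same = K
    · subst hsame
      obtain ⟨x, hx, hfx⟩ := hex
      have hsome : (S.find? (fun x => decide (ones count x sg.length ≤ same))).isSome := by
        rw [List.find?_isSome]
        exact ⟨x, hx, by simp [hfx]⟩
      obtain ⟨b, hb⟩ := Option.isSome_iff_exists.mp hsome
      refine ⟨b, hb, ?_⟩
      show (match knockFind s sg count same 0 with
            | some i => knockSet count i sg.length
            | none => knockWhile s sg count (same+1) fuel) = _
      rw [hfind, hb]
    · have hnone : S.find? (fun x => decide (ones count x sg.length ≤ same)) = none := by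
        rw [List.find?_eq_none]
        intro x hx
        have := hlb x hx
        simp
        omega
      obtain ⟨b, hb, hw⟩ := ih (same+1) (by omega) (by omega)
      refine ⟨b, hb, ?_⟩
      show (match knockFind s sg count same 0 with
            | some i => knockSet count i sg.length
            | none => knockWhile s sg count (same+1) fuel) = _
      rw [hfind, hnone]
      exact hw

theorem pred_false_of_short (s sg : List Char) (i : Nat) (h : s.length - i < sg.length) :
    ¬ (s.drop i).take sg.length = sg := by
  intro heq
  have := congrArg List.length heq
  simp [List.length_take, List.length_drop] at this
  omega

theorem pred_lt_length (s sg : List Char) (hsg : sg ≠ []) (i : Nat)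
    (h : (s.drop i).take sg.length = sg) : i + sg.length ≤ s.length := by
  by_contra hc
  exact pred_false_of_short s sg i (by have := List.length_pos_of_ne_nil hsg; omega) h

theorem starts_eq (s sg : List Char) (hsg : sg ≠ []) :
    (List.range (s.length - sg.length + 1)).filter (fun i => decide ((s.drop i).take sg.length = sg)) =
    (List.range s.length).filter (fun i => decide ((s.drop i).take sg.length = sg)) := by
  have key : ∀ (l : List Nat), (∀ i ∈ l, s.length - i < sg.length) →
      l.filter (fun i => decide ((s.drop i).take sg.length = sg)) = [] := by
    intro l h
    rw [List.filter_eq_nil_iff]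
    intro i hi
    simp only [decide_eq_true_eq]
    exact pred_false_of_short s sg i (h i hi)
  have hpos : 0 < sg.length := List.length_pos_of_ne_nil hsg
  by_cases hmn : sg.length ≤ s.length
  · have hsum : s.length = (s.length - sg.length + 1) + (s.length - (s.length - sg.length + 1)) := by
      omega
    have hrange : List.range s.length = List.range (s.length - sg.length + 1) ++
        (List.range (s.length - (s.length - sg.length + 1))).map
          (fun x => (s.length - sg.length + 1) + x) := by
      conv_lhs => rw [hsum]
      exact List.range_add
    have h2 : (List.filter (fun i => decide ((s.drop i).take sg.length = sg))
        ((List.range (s.length - (s.length - sg.length + 1))).map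
          (fun x => (s.length - sg.length + 1) + x))) = [] := by
      apply key
      intro i hi
      obtain ⟨j, hj, rfl⟩ := List.mem_map.mp hi
      omega
    rw [hrange, List.filter_append, h2, List.append_nil]
  · rw [key _ (by intro i _; omega), key _ (by intro i _; omega)]

theorem isIn_iff_starts (s sg : List Char) (hsg : sg ≠ []) :
    PySem.Chars.isIn sg s = true ↔
      (List.range s.length).filter (fun i => decide ((s.drop i).take sg.length = sg)) ≠ [] := by
  rw [← PySem.Chars.exists_prefix_drop_iff_isIn]
  constructor
  · intro ⟨j, hj⟩ hnil
    have hpred : (s.drop j).take sg.length = sg := by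
      rw [List.prefix_iff_eq_take] at hj
      exact hj.symm
    have hjlt : j < s.length := by
      have := pred_lt_length s sg hsg j hpred
      have := List.length_pos_of_ne_nil hsg
      omega
    rw [List.filter_eq_nil_iff] at hnil
    exact hnil j (List.mem_range.mpr hjlt) (by simpa using hpred)
  · intro hne
    obtain ⟨x, hx⟩ := List.exists_mem_of_ne_nil _ hne
    have hpred := List.of_mem_filter hx
    simp only [decide_eq_true_eq] at hpred
    exact ⟨x, by rw [List.prefix_iff_eq_take]; exact hpred.symm⟩

theorem knock_step_eq (s sg : List Char) (hsg : sg ≠ []) (count : List Int)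
    (hinv : inv01 count) (hlen : count.length = s.length) :
    (if PySem.Chars.isIn sg s then knockWhile s sg count 0 (sg.length + 1) else count) =
    (match (List.range (s.length - sg.length + 1)).filter (fun i => (s.drop i).take sg.length = sg) with
     | [] => count
     | i0 :: rest => knockPlace count (knockBest count sg.length rest i0) sg.length) := by
  have hst := starts_eq s sg hsg
  rcases hS : (List.range s.length).filter (fun i => decide ((s.drop i).take sg.length = sg)) with _ | ⟨i0, rest⟩
  · rw [if_neg (by rw [isIn_iff_starts s sg hsg]; simp [hS])]
    simp only [hst, hS]
  · rw [if_pos (by rw [isIn_iff_starts s sg hsg]; simp [hS])]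
    simp only [hst, hS]
    obtain ⟨K, hlb, hex⟩ := exists_minKey (fun x => ones count x sg.length) (i0 :: rest) (by simp)
    have hKlt : K < sg.length + 1 := by
      obtain ⟨x, _, hfx⟩ := hex
      have : ones count x sg.length ≤ sg.length := by
        calc ((count.drop x).take sg.length).count 1 ≤ ((count.drop x).take sg.length).length :=
              List.count_le_length
          _ ≤ sg.length := List.length_take_le _ _
      omega
    obtain ⟨b, hfind, hwhile⟩ := knockWhile_eq s sg hsg count K (i0 :: rest) hS.symm hlb hex
      (sg.length + 1) 0 (by omega) (by omega)
    rw [hwhile]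
    have hbest := knockBest_eq count sg.length hinv K rest i0 hlb hex
    rw [hfind] at hbest
    have hbmem : b ∈ i0 :: rest := List.mem_of_find?_eq_some hfind
    have hbpred : (s.drop b).take sg.length = sg := by
      rw [← hS] at hbmem
      have := List.of_mem_filter hbmem
      simpa using this
    injection hbest with hb
    rw [knockSet_eq sg.length count b (by rw [hlen]; exact pred_lt_length s sg hsg b hbpred), hb]
    rfl

theorem knock_final_eq (c : List Int) (hne : c ≠ []) (hinv : inv01 c) :
    decide (PySem.List.min? c (fun x => x) = some 1) = !(c.contains 0) := by
  rcases hm : PySem.List.min? c (fun x => x) with _ | v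
  · rw [PySem.List.min?_eq_none_iff] at hm
    exact absurd hm hne
  · have hvmem : v ∈ c := PySem.List.min?_mem hm
    have hvmin : ∀ y ∈ c, v ≤ y := fun y hy => PySem.List.min?_isMin hm y hy
    by_cases hc : (0 : Int) ∈ c
    · have hv0 : v = 0 := by
        have := hvmin 0 hc
        rcases hinv v hvmem with h | h <;> omega
      subst hv0
      simpa using hc
    · have hv1 : v = 1 := by
        rcases hinv v hvmem with h | h
        · exact absurd (h ▸ hvmem) hc
        · exact h
      subst hv1
      simpa using hc

theorem knockBest_mem (count : List Int) (m : Nat) :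
    ∀ (t : List Nat) (b : Nat), knockBest count m t b ∈ b :: t := by
  intro t
  induction t with
  | nil => intro b; simp [knockBest]
  | cons i t' ih =>
    intro b
    show knockBest count m t' (if _ then i else b) ∈ _
    have := ih (if knockOverlap count i m < knockOverlap count b m then i else b)
    rcases List.mem_cons.mp this with h | h
    · rw [h]
      split <;> simp
    · simp [h]

theorem knockPlace_inv (count : List Int) (hinv : inv01 count) (i m : Nat) :
    inv01 (knockPlace count i m) := by
  intro x hx
  simp only [knockPlace, List.mem_append] at hx
  rcases hx with (hx | hx) | hx
  · exact hinv x (List.mem_of_mem_take hx)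
  · right; exact List.eq_of_mem_replicate hx
  · exact hinv x (List.mem_of_mem_drop hx)

theorem knockPlace_len (count : List Int) (i m : Nat) (h : i + m ≤ count.length) :
    (knockPlace count i m).length = count.length := by
  simp [knockPlace]
  omega

theorem knock_fold (s : List Char) : ∀ (segs : List String) (count : List Int),
    (∀ sg ∈ segs, sg ≠ "") → inv01 count → count.length = s.length →
    segs.foldl (fun count seg =>
        if PySem.Chars.isIn seg.toList s then knockWhile s seg.toList count 0 (seg.toList.length + 1)
        else count) count =
      segs.foldl (fun count seg =>
        match (List.range (s.length - seg.toList.length + 1)).filter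
            (fun i => (s.drop i).take seg.toList.length = seg.toList) with
        | [] => count
        | i0 :: rest => knockPlace count (knockBest count seg.toList.length rest i0) seg.toList.length)
        count ∧
    inv01 (segs.foldl (fun count seg =>
        match (List.range (s.length - seg.toList.length + 1)).filter
            (fun i => (s.drop i).take seg.toList.length = seg.toList) with
        | [] => count
        | i0 :: rest => knockPlace count (knockBest count seg.toList.length rest i0) seg.toList.length)
        count) ∧
    (segs.foldl (fun count seg =>
        match (List.range (s.length - seg.toList.length + 1)).filter
            (fun i => (s.drop i).take seg.toList.length = seg.toList) with
        | [] => count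
        | i0 :: rest => knockPlace count (knockBest count seg.toList.length rest i0) seg.toList.length)
        count).length = s.length := by
  intro segs
  induction segs with
  | nil => intro count _ hinv hlen; exact ⟨rfl, hinv, hlen⟩
  | cons sg segs ih =>
    intro count hne hinv hlen
    have hsg : sg.toList ≠ [] := by
      intro h
      exact hne sg (by simp) (String.toList_eq_nil_iff.mp h)
    have hstep := knock_step_eq s sg.toList hsg count hinv hlen
    simp only [List.foldl_cons]
    rw [hstep]
    apply ih
    · intro x hx; exact hne x (by simp [hx])
    all_goals {
      rcases hF : (List.range (s.length - sg.toList.length + 1)).filter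
          (fun i => decide ((s.drop i).take sg.toList.length = sg.toList)) with _ | ⟨i0, rest⟩ <;>
        simp only [hF]
      · first
        | exact hinv
        | exact hlen
      · have hmem : knockBest count sg.toList.length rest i0 ∈ i0 :: rest :=
          knockBest_mem count sg.toList.length rest i0
        have hpred : (s.drop (knockBest count sg.toList.length rest i0)).take sg.toList.length
            = sg.toList := by
          rw [← hF] at hmem
          simpa using List.of_mem_filter hmem
        have hle : knockBest count sg.toList.length rest i0 + sg.toList.length ≤ count.length := by
          rw [hlen]
          exact pred_lt_length s sg.toList hsg _ hpred
        first
        | exact knockPlace_inv count hinv _ _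
        | (rw [knockPlace_len count _ _ hle]; exact hlen)
    }

-- ===== VERDICT (by name: the statement is the Claim_ definition above) =====
theorem knock_spec : Claim_equal_knock := by
  intro segs str hdom hpre
  obtain ⟨hns, hne⟩ := hpre
  unfold Spec_knock knock knock_alt
  simp only []
  have hsegs : ∀ sg ∈ segs, sg ≠ "" := fun sg hsg h => hns (h ▸ hsg)
  have hinv0 : inv01 (List.replicate str.toList.length (0 : Int)) := by
    intro x hx
    left
    exact List.eq_of_mem_replicate hx
  obtain ⟨heq, hinvf, hlenf⟩ :=
    knock_fold str.toList segs (List.replicate str.toList.length (0 : Int)) hsegs hinv0 (by simp)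
  rw [heq]
  apply knock_final_eq _ _ hinvf
  intro h
  apply hne
  apply String.toList_eq_nil_iff.mp
  apply List.length_eq_zero_iff.mp
  rw [← hlenf, h]
  rfl
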